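-- pv_equiv track=rewrite | github.com/alexey-zakharenkov/subways | subway_structure.py | find_common_circular_subsequence
-- ===== SOURCE A (Python) =====
-- from typing import TypeVar
--
-- T = TypeVar("T")
--
-- def find_common_circular_subsequence(
--     seq1: list[T], seq2: list[T]
-- ) -> list[T]:
--     """seq1 and seq2 are supposed to be stops of some circular routes.
--     Prerequisites to rely on the result:
--      - elements of each sequence are not repeated
--      - the order of stations is not violated.
--     Under these conditions we don't need LCS algorithm. Linear scan is
--     sufficient.
--     """
--     i1, i2 = -1, -1
--     for i1, x in enumerate(seq1):
--         try:
--             i2 = seq2.index(x)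
--         except ValueError:
--             continue
--         else:
--             # x is found both in seq1 and seq2
--             break
--
--     if i2 == -1:
--         return []
--
--     # Shift cyclically so that the common element takes the first position
--     # both in seq1 and seq2
--     seq1 = seq1[i1:] + seq1[:i1]
--     seq2 = seq2[i2:] + seq2[:i2]
--
--     common_subsequence = []
--     i2 = 0
--     for x in seq1:
--         try:
--             i2 = seq2.index(x, i2)
--         except ValueError:
--             continue
--         common_subsequence.append(x)
--         i2 += 1
--         if i2 >= len(seq2):
--             break
--     return common_subsequence
-- ===== SOURCE B (Python) =====
-- def find_common_circular_subsequence(seq1, seq2):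
--     # Map each element of seq2 to its first position, built in one pass.
--     first_pos = {}
--     for j, x in enumerate(seq2):
--         first_pos.setdefault(x, j)
--
--     # All anchor candidates: elements of seq1 that occur in seq2, with
--     # both positions; the first one is where both rotations start.
--     anchors = [(i, first_pos[x]) for i, x in enumerate(seq1) if x in first_pos]
--     if not anchors:
--         return []
--     i1, i2 = anchors[0]
--
--     order = seq1[i1:] + seq1[:i1]
--     rest = seq2[i2:] + seq2[:i2]
--
--     # Consume the unmatched tail of seq2 directly: each match chops the
--     # matched prefix off `rest`; no integer cursor, no start-index search.
--     out = []
--     for x in order: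
--         if x in rest:
--             k = rest.index(x)
--             out.append(x)
--             rest = rest[k + 1:]
--             if not rest:
--                 break
--     return out
-- ===== Notes on version B (the rewrite author's own statement) =====
-- stated objective: alternative
-- what changed: Anchor search becomes a one-pass first-position dict of seq2 plus a comprehension over seq1 (no try/except index scans), and the matching phase keeps no integer cursor at all: it consumes seq2's rotated tail as a shrinking suffix list, chopping off the matched prefix after every hit.
import Mathlib
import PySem

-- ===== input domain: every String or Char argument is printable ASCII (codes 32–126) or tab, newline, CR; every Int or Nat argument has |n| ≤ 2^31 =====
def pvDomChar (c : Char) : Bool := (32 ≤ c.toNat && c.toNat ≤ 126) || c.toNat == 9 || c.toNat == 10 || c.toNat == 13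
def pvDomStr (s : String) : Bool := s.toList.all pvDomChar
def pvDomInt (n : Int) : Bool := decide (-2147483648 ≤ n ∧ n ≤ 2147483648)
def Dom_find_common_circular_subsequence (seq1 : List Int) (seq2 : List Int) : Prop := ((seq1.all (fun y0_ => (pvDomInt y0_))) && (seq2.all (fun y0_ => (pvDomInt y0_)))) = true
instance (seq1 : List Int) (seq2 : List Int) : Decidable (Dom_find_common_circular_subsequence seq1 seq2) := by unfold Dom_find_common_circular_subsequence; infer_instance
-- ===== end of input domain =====

-- B restructures A: a one-pass first-position dict + comprehension replaces A's try/except anchor scan, and the matching phase consumes seq2's rotated tail as a shrinking suffix list instead of keeping an integer cursor (alternative decomposition, same cost).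


-- ===== PORT A =====
-- seq2.index(x, k): first index ≥ k of x, none = ValueError (hand port; exact for the
-- non-negative start indices this code produces)
def pvIndexFrom (s : List Int) (x : Int) (k : Nat) : Option Nat :=
  (PySem.List.index? (s.drop k) x).map (· + k)

-- the first 'for i1, x in enumerate(seq1)' loop with its try/break: returns (i1, i2) or none
def pvA_phase1 (seq2 : List Int) : List Int → Nat → Option (Nat × Nat)
  | [], _ => none
  | x :: rest, i =>
    match PySem.List.index? seq2 x with
    | some j => some (i, j)
    | none => pvA_phase1 seq2 rest (i + 1)

-- the second 'for x in seq1' loop: state = (current i2, common_subsequence)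
def pvA_phase2 (seq2r : List Int) : List Int → Nat → List Int → List Int
  | [], _, acc => acc
  | x :: rest, i2, acc =>
    match pvIndexFrom seq2r x i2 with
    | none => pvA_phase2 seq2r rest i2 acc
    | some j =>
      if j + 1 ≥ seq2r.length then acc ++ [x]
      else pvA_phase2 seq2r rest (j + 1) (acc ++ [x])

def find_common_circular_subsequence (seq1 : List Int) (seq2 : List Int) : List Int :=
  match pvA_phase1 seq2 seq1 0 with
  | none => []
  | some (i1, i2) =>
    let s1 := PySem.List.slice seq1 (some (i1 : Int)) none ++ PySem.List.slice seq1 none (some (i1 : Int))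
    let s2 := PySem.List.slice seq2 (some (i2 : Int)) none ++ PySem.List.slice seq2 none (some (i2 : Int))
    pvA_phase2 s2 s1 0 []

-- ===== PORT B =====
-- 'for j, x in enumerate(seq2): first_pos.setdefault(x, j)'
def pvFirstPos : List Int → Nat → PySem.Dict Int Nat → PySem.Dict Int Nat
  | [], _, d => d
  | x :: rest, j, d => pvFirstPos rest (j + 1) (d.setdefault x j)

-- '[(i, first_pos[x]) for i, x in enumerate(seq1) if x in first_pos]'
def pvAnchors (fp : PySem.Dict Int Nat) : List Int → Nat → List (Nat × Nat)
  | [], _ => []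
  | x :: rest, i =>
    match fp.get? x with
    | some j => (i, j) :: pvAnchors fp rest (i + 1)
    | none => pvAnchors fp rest (i + 1)

-- the 'for x in order' loop: state = (remaining suffix of seq2, out);
-- 'x in rest' + 'rest.index(x)' ported together as one index? match (in ⇔ index? ≠ none)
def pvConsume : List Int → List Int → List Int → List Int
  | [], _, out => out
  | x :: r, rest, out =>
    match PySem.List.index? rest x with
    | none => pvConsume r rest out
    | some k =>
      let rest' := PySem.List.slice rest (some ((k : Int) + 1)) none
      if rest' = [] then out ++ [x]
      else pvConsume r rest' (out ++ [x])

def find_common_circular_subsequence_alt (seq1 : List Int) (seq2 : List Int) : List Int :=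
  let fp := pvFirstPos seq2 0 PySem.Dict.empty
  match pvAnchors fp seq1 0 with
  | [] => []
  | (i1, i2) :: _ =>
    let order := PySem.List.slice seq1 (some (i1 : Int)) none ++ PySem.List.slice seq1 none (some (i1 : Int))
    let rest := PySem.List.slice seq2 (some (i2 : Int)) none ++ PySem.List.slice seq2 none (some (i2 : Int))
    pvConsume order rest []

-- ===== PRECONDITION & SPEC =====
def Spec_find_common_circular_subsequence (seq1 : List Int) (seq2 : List Int) (out : List Int) : Prop := out = find_common_circular_subsequence_alt seq1 seq2
instance (seq1 : List Int) (seq2 : List Int) (out : List Int) : Decidable (Spec_find_common_circular_subsequence seq1 seq2 out) := by unfold Spec_find_common_circular_subsequence; infer_instance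

-- ===== CLAIM =====
def Claim_equal_find_common_circular_subsequence : Prop := ∀ (seq1 : List Int) (seq2 : List Int), Dom_find_common_circular_subsequence seq1 seq2 → Spec_find_common_circular_subsequence seq1 seq2 (find_common_circular_subsequence seq1 seq2)

-- ===== LEMMAS AND PROOFS =====
theorem pvFirstPos_get? (s : List Int) (j : Nat) (d : PySem.Dict Int Nat) (x : Int) :
    (pvFirstPos s j d).get? x =
      match d.get? x with
      | some v => some v
      | none => (PySem.List.index? s x).map (· + j) := by
  induction s generalizing j d with
  | nil => cases hd : d.get? x <;> simp [pvFirstPos, hd]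
  | cons y rest ih =>
    rw [pvFirstPos, ih]
    by_cases h : y = x
    · subst h
      rw [PySem.Dict.get?_setdefault_self, PySem.List.index?_cons_self]
      cases hd : d.get? y <;> simp
    · rw [PySem.Dict.get?_setdefault_of_ne d j (Ne.symm h), PySem.List.index?_cons_of_ne rest h]
      cases hd : d.get? x with
      | some v => rfl
      | none =>
        cases PySem.List.index? rest x with
        | none => rfl
        | some k => simp; omega

theorem pvAnchors_head (seq2 l : List Int) (i : Nat) :
    (pvAnchors (pvFirstPos seq2 0 PySem.Dict.empty) l i).head? = pvA_phase1 seq2 l i := by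
  induction l generalizing i with
  | nil => rfl
  | cons x rest ih =>
    have hg : (pvFirstPos seq2 0 PySem.Dict.empty).get? x
        = (PySem.List.index? seq2 x).map (· + 0) := by
      rw [pvFirstPos_get?, PySem.Dict.get?_empty]
    simp only [pvAnchors, pvA_phase1, hg]
    cases PySem.List.index? seq2 x with
    | none => simpa using ih (i + 1)
    | some j => simp

theorem pvConsume_eq (s2 : List Int) (l : List Int) (ptr : Nat) (acc : List Int) :
    pvConsume l (s2.drop ptr) acc = pvA_phase2 s2 l ptr acc := by
  induction l generalizing ptr acc with
  | nil => rfl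
  | cons x rest ih =>
    simp only [pvConsume, pvA_phase2, pvIndexFrom]
    cases h : PySem.List.index? (s2.drop ptr) x with
    | none => simpa using ih ptr acc
    | some k =>
      obtain ⟨hk, -, -⟩ := PySem.List.getElem_of_index?_eq_some h
      have hlen : (s2.drop ptr).length = s2.length - ptr := by simp
      have hptr : ptr < s2.length := by omega
      have hsl : PySem.List.slice (s2.drop ptr) (some ((k : Int) + 1)) none
          = s2.drop (ptr + (k + 1)) := by
        have : ((k : Int) + 1) = ((k + 1 : Nat) : Int) := by push_cast; ring
        rw [this, PySem.List.slice_from_natCast, List.drop_drop]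
      have hempty : (s2.drop (ptr + (k + 1)) = []) ↔ (k + ptr + 1 ≥ s2.length) := by
        rw [List.drop_eq_nil_iff]
        omega
      simp only [hsl, Option.map_some]
      by_cases hb : k + ptr + 1 ≥ s2.length
      · rw [if_pos (hempty.mpr hb), if_pos (by omega)]
      · rw [if_neg (fun hc => hb (hempty.mp hc)), if_neg (show ¬ k + ptr + 1 ≥ s2.length from hb)]
        have := ih (k + ptr + 1) (acc ++ [x])
        rw [show ptr + (k + 1) = k + ptr + 1 by omega]
        exact this

-- ===== VERDICT =====
theorem find_common_circular_subsequence_spec : Claim_equal_find_common_circular_subsequence := by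
  intro seq1 seq2 _
  unfold Spec_find_common_circular_subsequence
  simp only [find_common_circular_subsequence, find_common_circular_subsequence_alt]
  have h := pvAnchors_head seq2 seq1 0
  cases ha : pvAnchors (pvFirstPos seq2 0 PySem.Dict.empty) seq1 0 with
  | nil =>
    rw [ha] at h
    rw [← h]
    rfl
  | cons p tl =>
    obtain ⟨i1, i2⟩ := p
    rw [ha] at h
    rw [← h]
    simp only []
    have := pvConsume_eq
      (PySem.List.slice seq2 (some (i2 : Int)) none ++ PySem.List.slice seq2 none (some (i2 : Int)))
      (PySem.List.slice seq1 (some (i1 : Int)) none ++ PySem.List.slice seq1 none (some (i1 : Int)))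
      0 []
    simpa using this.symm
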